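-- pv_equiv track=rewrite | github.com/Dekamik/JavaAutoComment | java-auto-comment.py | insert_comments
-- ===== SOURCE A (Python) =====
-- def get_variable_name(line):
-- 	return line.split(" ")[-1].split(";")[0]
--
-- def get_variable_in_method_name(line, prefix):
-- 	variable = line[(line.index(prefix) + len(prefix)):]
-- 	variable = variable.split("(")[0]
-- 	return variable[0].lower() + variable[1:]
--
-- def count_leading_spaces(line):
-- 	return (len(line) - len(line.lstrip(' ')))
--
-- def insert_comments(lines):
-- 	index = 0
-- 	while index < len(lines):
-- 		line = lines[index]
-- 		comment = None
--
-- 		if "private" in line: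
-- 			# Variables
-- 			if "(" not in line and ")" not in line:
-- 				variable = get_variable_name(line)
-- 				indentation = count_leading_spaces(line)
-- 				comment = "/** */"
--
-- 		if "public" in line:
-- 			# Getters
-- 			if "get" in line:
-- 				variable = get_variable_in_method_name(line, "get")
-- 				indentation = count_leading_spaces(line)
-- 				comment = "/** @return the " + variable + " */"
--
-- 			# Setters
-- 			elif "set" in line:
-- 				variable = get_variable_in_method_name(line, "set")
-- 				indentation = count_leading_spaces(line)
-- 				comment = "/** @param " + variable + " the " + variable + " to set */"
--
-- 		if comment is not None:
-- 			while indentation > 0: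
-- 				comment = " " + comment
-- 				indentation -= 1
-- 			lines.insert(index, comment)
-- 			index += 1
--
-- 		index += 1
-- 	return "\n".join(lines)
-- ===== SOURCE B (Python) =====
-- def count_leading_spaces(line):
-- 	return (len(line) - len(line.lstrip(' ')))
--
-- def _classify(line):
-- 	"""Return the fully indented comment to put before `line`, or None."""
-- 	comment = None
-- 	if "private" in line and "(" not in line and ")" not in line:
-- 		comment = "/** */"
-- 	if "public" in line:
-- 		if "get" in line:
-- 			v = line[line.index("get") + 3:].split("(")[0]
-- 			comment = "/** @return the " + v[0].lower() + v[1:] + " */"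
-- 		elif "set" in line:
-- 			v = line[line.index("set") + 3:].split("(")[0]
-- 			comment = "/** @param " + v[0].lower() + v[1:] + " the " + v[0].lower() + v[1:] + " to set */"
-- 	if comment is None:
-- 		return None
-- 	return " " * count_leading_spaces(line) + comment
--
-- def insert_comments(lines):
-- 	out = []
-- 	for line in lines:
-- 		c = _classify(line)
-- 		if c is not None:
-- 			out.append(c)
-- 		out.append(line)
-- 	lines[:] = out
-- 	return "\n".join(out)
-- ===== Notes on version B (the rewrite author's own statement) =====
-- stated objective: simpler
-- what changed: Replaces the index-tracking while loop that mutates the list via insert() and a double index increment (plus a char-by-char indentation loop) with a single forward pass that classifies each line once and appends the indented comment (' ' * n + comment) and the line to a fresh output list, written back with lines[:] = out.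
import Mathlib
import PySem

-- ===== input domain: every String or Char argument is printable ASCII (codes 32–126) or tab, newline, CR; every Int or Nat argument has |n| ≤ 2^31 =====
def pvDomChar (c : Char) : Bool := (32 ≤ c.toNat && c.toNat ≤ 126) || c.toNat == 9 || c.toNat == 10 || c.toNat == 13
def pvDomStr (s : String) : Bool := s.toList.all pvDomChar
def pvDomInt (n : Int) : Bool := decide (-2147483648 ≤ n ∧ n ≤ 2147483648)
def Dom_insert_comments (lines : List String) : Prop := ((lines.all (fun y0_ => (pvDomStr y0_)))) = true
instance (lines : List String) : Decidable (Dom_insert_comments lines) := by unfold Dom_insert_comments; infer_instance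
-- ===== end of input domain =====

-- B replaces A's index/insert/double-increment loop by a single forward pass that classifies each
-- line and appends comment+line to a fresh list (objective: simpler); both A and B mutate the
-- `lines` argument to the same final contents, and the theorems are about the return value only.

-- ===== PORT A =====

-- "private int x;".split(" ")[-1].split(";")[0]  (A computes this but never uses the value)
def pvGetVariableName (line : List Char) : List Char :=
  (PySem.Chars.splitOn ((PySem.Chars.splitOn line [' ']).getLastD []) [';']).headD []

-- get_variable_in_method_name: callers only call it when prefx occurs in line, so
-- line.index(prefix) = Chars.find ≥ 0; when the extracted variable is empty Python raises
-- IndexError (excluded by Pre_) — the port returns [] there.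
def pvGetVariableInMethodName (line prefx : List Char) : List Char :=
  let var := PySem.List.slice line (some (PySem.Chars.find line prefx + prefx.length)) none
  let var := (PySem.Chars.splitOn var ['(']).headD []
  match var with
  | [] => []  -- Python: variable[0] raises IndexError (outside Pre_)
  | c :: rest => PySem.Chars.lowerChar c :: rest

-- count_leading_spaces: len(line) - len(line.lstrip(' ')); lstrip(' ') drops leading ' ' only
-- (hand port, exact: dropWhile (· == ' ') is exactly str.lstrip(' ')).
def pvCountLeadingSpacesA (line : List Char) : Nat :=
  line.length - (line.dropWhile (fun c => c == ' ')).length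

-- the body of A's loop that decides which (un-indented) comment the line gets, branch for branch
def pvCommentA (line : List Char) : Option (List Char) :=
  let c0 : Option (List Char) :=
    if PySem.Chars.isIn "private".toList line then
      if PySem.Chars.isIn "(".toList line = false ∧ PySem.Chars.isIn ")".toList line = false then
        let _var := pvGetVariableName line
        some "/** */".toList
      else none
    else none
  if PySem.Chars.isIn "public".toList line then
    if PySem.Chars.isIn "get".toList line then
      some ("/** @return the ".toList ++ pvGetVariableInMethodName line "get".toList ++ " */".toList)
    else if PySem.Chars.isIn "set".toList line then
      let v := pvGetVariableInMethodName line "set".toList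
      some ("/** @param ".toList ++ v ++ " the ".toList ++ v ++ " to set */".toList)
    else c0
  else c0

-- while indentation > 0: comment = " " + comment
def pvIndentA : Nat → List Char → List Char
  | 0, c => c
  | n + 1, c => pvIndentA n (' ' :: c)

-- while index < len(lines): … lines.insert(index, comment); index += 2 / index += 1
def pvLoopA (lines : List (List Char)) (index : Nat) : List (List Char) :=
  if h : index < lines.length then
    let line := lines[index]
    match pvCommentA line with
    | some comment =>
        pvLoopA (PySem.List.insert lines (index : Int) (pvIndentA (pvCountLeadingSpacesA line) comment)) (index + 2)
    | none => pvLoopA lines (index + 1)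
  else lines
termination_by lines.length - index
decreasing_by
  · rw [PySem.List.insert_natCast lines index _ (Nat.le_of_lt h)]
    simp
    omega
  · omega

def insert_comments (lines : List String) : String :=
  String.ofList (PySem.Chars.join ['\n'] (pvLoopA (lines.map String.toList) 0))

-- ===== PORT B =====

def pvCountLeadingSpacesB (line : List Char) : Nat :=
  line.length - (line.dropWhile (fun c => c == ' ')).length

-- v = line[line.index(p) + len(p):].split("(")[0]  (same IndexError note as in port A)
def pvVarB (line prefx : List Char) : List Char :=
  (PySem.Chars.splitOn (PySem.List.slice line (some (PySem.Chars.find line prefx + prefx.length)) none) ['(']).headD []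

-- v[0].lower() + v[1:]
def pvLowerFirstB (v : List Char) : List Char :=
  match v with
  | [] => []  -- Python: v[0] raises IndexError (outside Pre_)
  | c :: rest => PySem.Chars.lowerChar c :: rest

-- _classify: the indented comment to put before the line, or none
def pvClassifyB (line : List Char) : Option (List Char) :=
  let comment : Option (List Char) :=
    if PySem.Chars.isIn "private".toList line && !PySem.Chars.isIn "(".toList line
        && !PySem.Chars.isIn ")".toList line then
      some "/** */".toList
    else none
  let comment : Option (List Char) :=
    if PySem.Chars.isIn "public".toList line then
      if PySem.Chars.isIn "get".toList line then
        let v := pvVarB line "get".toList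
        some ("/** @return the ".toList ++ pvLowerFirstB v ++ " */".toList)
      else if PySem.Chars.isIn "set".toList line then
        let v := pvVarB line "set".toList
        some ("/** @param ".toList ++ pvLowerFirstB v ++ " the ".toList ++ pvLowerFirstB v ++ " to set */".toList)
      else comment
    else comment
  match comment with
  | none => none
  | some c => some (List.replicate (pvCountLeadingSpacesB line) ' ' ++ c)

def insert_comments_alt (lines : List String) : String :=
  let out := (lines.map String.toList).foldl (fun acc line =>
    match pvClassifyB line with
    | some c => acc ++ [c, line]
    | none => acc ++ [line]) []
  String.ofList (PySem.Chars.join ['\n'] out)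

-- ===== PRECONDITION & SPEC =====

-- after the first occurrence of p in l there is at least one character and it is not '(':
-- otherwise get_variable_in_method_name's variable[0] raises IndexError in Python
def pvAfterOk (l p : List Char) : Bool :=
  match l.drop ((PySem.Chars.find l p).toNat + p.length) with
  | [] => false
  | c :: _ => c != '('

def pvOkLine (l : List Char) : Bool :=
  !PySem.Chars.isIn "public".toList l ||
    (if PySem.Chars.isIn "get".toList l then pvAfterOk l "get".toList
     else !PySem.Chars.isIn "set".toList l || pvAfterOk l "set".toList)

-- Pre_ excludes exactly the inputs on which Python A raises IndexError: a line containing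
-- "public" whose getter/setter name (the text after the first "get"/"set", before "(") is empty.
def Pre_insert_comments (lines : List String) : Prop :=
  (lines.all (fun s => pvOkLine s.toList)) = true
instance (lines : List String) : Decidable (Pre_insert_comments lines) := by
  unfold Pre_insert_comments; infer_instance

def pvWitness_insert_comments : List String :=
  ["  private int x;", "public int getX() {", "  public void setX(int x) {"]

def Spec_insert_comments (lines : List String) (out : String) : Prop := out = insert_comments_alt lines
instance (lines : List String) (out : String) : Decidable (Spec_insert_comments lines out) := by
  unfold Spec_insert_comments; infer_instance

-- ===== CLAIM (what is proved, stated in full; the proofs are below) =====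
def Claim_equal_insert_comments : Prop := ∀ (lines : List String), Dom_insert_comments lines → Pre_insert_comments lines → Spec_insert_comments lines (insert_comments lines)

-- ===== LEMMAS AND PROOFS =====

-- what one line contributes to the output
def pvG (l : List Char) : List (List Char) :=
  match pvClassifyB l with
  | some c => [c, l]
  | none => [l]

theorem pvIndentA_eq (n : Nat) (c : List Char) :
    pvIndentA n c = List.replicate n ' ' ++ c := by
  induction n generalizing c with
  | zero => simp [pvIndentA]
  | succ m ih =>
    rw [pvIndentA, ih, List.replicate_succ']
    simp

theorem pvClassifyB_eq (l : List Char) :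
    pvClassifyB l = (pvCommentA l).map (fun c => pvIndentA (pvCountLeadingSpacesA l) c) := by
  have hv : ∀ p, pvLowerFirstB (pvVarB l p) = pvGetVariableInMethodName l p := by
    intro p
    rfl
  simp only [pvClassifyB, pvCommentA, pvIndentA_eq, hv, pvCountLeadingSpacesB,
    pvCountLeadingSpacesA]
  cases hpub : PySem.Chars.isIn "public".toList l <;>
    cases hget : PySem.Chars.isIn "get".toList l <;>
      cases hset : PySem.Chars.isIn "set".toList l <;>
        cases hpriv : PySem.Chars.isIn "private".toList l <;>
          cases hop : PySem.Chars.isIn "(".toList l <;>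
            cases hcl : PySem.Chars.isIn ")".toList l <;>
              simp

theorem pvStep_eq (l : List Char) :
    (match pvCommentA l with
     | some c => [pvIndentA (pvCountLeadingSpacesA l) c, l]
     | none => [l]) = pvG l := by
  rw [pvG, pvClassifyB_eq]
  cases pvCommentA l <;> simp

theorem pvLoopA_eq (rem pre : List (List Char)) :
    pvLoopA (pre ++ rem) pre.length = pre ++ rem.flatMap pvG := by
  induction rem generalizing pre with
  | nil =>
    rw [pvLoopA]
    simp
  | cons l rest ih =>
    have hlt : pre.length < (pre ++ l :: rest).length := by simp
    rw [pvLoopA, dif_pos hlt]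
    have hget : (pre ++ l :: rest)[pre.length]'hlt = l := by
      simp
    cases hc : pvCommentA l with
    | none =>
      simp only [hget, hc]
      have h1 : pre.length + 1 = (pre ++ [l]).length := by simp
      have h2 : pre ++ l :: rest = (pre ++ [l]) ++ rest := by simp
      rw [h1, h2, ih (pre ++ [l])]
      have := pvStep_eq l
      rw [hc] at this
      simp [← this]
    | some c =>
      simp only [hget, hc]
      have hins : PySem.List.insert (pre ++ l :: rest) (pre.length : Int)
          (pvIndentA (pvCountLeadingSpacesA l) c)
          = (pre ++ [pvIndentA (pvCountLeadingSpacesA l) c, l]) ++ rest := by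
        rw [PySem.List.insert_natCast _ _ _ (Nat.le_of_lt hlt)]
        simp
      have h1 : pre.length + 2 = (pre ++ [pvIndentA (pvCountLeadingSpacesA l) c, l]).length := by
        simp
      rw [hins, h1, ih (pre ++ [pvIndentA (pvCountLeadingSpacesA l) c, l])]
      have := pvStep_eq l
      rw [hc] at this
      simp [← this]

theorem pvFoldB_eq (ls : List (List Char)) :
    ls.foldl (fun acc line =>
      match pvClassifyB line with
      | some c => acc ++ [c, line]
      | none => acc ++ [line]) [] = ls.flatMap pvG := by
  have hfun : (fun (acc : List (List Char)) line =>
      match pvClassifyB line with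
      | some c => acc ++ [c, line]
      | none => acc ++ [line]) = fun acc line => acc ++ pvG line := by
    funext acc line
    rw [pvG]
    cases pvClassifyB line <;> simp
  rw [hfun, PySem.List.foldl_append_eq_flatMap]
  simp

-- ===== VERDICT (by name: the statement is the Claim_ definition above) =====
theorem insert_comments_spec : Claim_equal_insert_comments := by
  intro lines _ _
  unfold Spec_insert_comments insert_comments insert_comments_alt
  rw [pvFoldB_eq]
  have := pvLoopA_eq (lines.map String.toList) []
  simp only [List.nil_append, List.length_nil] at this
  rw [this]
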